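-- pv_equiv track=rewrite | github.com/zebben/mirror-gold-docs | scripts/wiki_pokemon.py | assign_form_indexes
-- ===== SOURCE A (Python) =====
-- from collections import defaultdict, deque
--
-- def assign_form_indexes(species_list, form_species):
--     # Group by base species prefix
--     form_groups = defaultdict(list)
--
--     for species in species_list:
--         if species in form_species:
--             base = form_species[species]
--             form_groups[base].append(species)
--         else:
--             form_groups[species].append(species)
--
--
--     # Assign form indexes and return the final dict
--     form_dict = {}
--     for base, forms in form_groups.items():
--         for idx, form in enumerate(forms, start=0):
--             form_dict[(base, idx)] = form.replace("SPECIES_", "")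
--     return form_dict
-- ===== SOURCE B (Python) =====
-- def assign_form_indexes(species_list, form_species):
--     # Bases in first-appearance order, then one filtered scan per base.
--     bases = list(dict.fromkeys(form_species.get(s, s) for s in species_list))
--     out = {}
--     for b in bases:
--         for idx, s in enumerate(x for x in species_list if form_species.get(x, x) == b):
--             out[(b, idx)] = s.replace("SPECIES_", "")
--     return out
-- ===== Notes on version B (the rewrite author's own statement) =====
-- stated objective: alternative
-- what changed: Replaces A's defaultdict grouping pass plus enumeration of the grouped lists by an ordered dedup of the base names followed by one filtered scan of species_list per base, eliminating the intermediate dict of group lists.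
import Mathlib
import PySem

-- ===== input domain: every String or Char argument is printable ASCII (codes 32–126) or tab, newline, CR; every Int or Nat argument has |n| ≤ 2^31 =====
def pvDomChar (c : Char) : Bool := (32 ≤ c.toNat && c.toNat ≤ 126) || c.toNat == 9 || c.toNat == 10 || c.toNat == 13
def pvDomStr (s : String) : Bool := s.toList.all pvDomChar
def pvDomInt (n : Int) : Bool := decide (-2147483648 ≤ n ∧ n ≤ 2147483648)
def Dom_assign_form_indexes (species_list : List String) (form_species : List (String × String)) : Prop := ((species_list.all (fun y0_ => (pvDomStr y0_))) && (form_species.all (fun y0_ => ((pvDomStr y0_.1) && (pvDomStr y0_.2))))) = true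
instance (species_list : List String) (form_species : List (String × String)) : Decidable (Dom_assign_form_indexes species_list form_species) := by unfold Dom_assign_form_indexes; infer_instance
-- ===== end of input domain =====

-- B replaces A's defaultdict grouping pass by an ordered dedup of the bases plus one
-- filtered scan per base (objective: alternative decomposition, not faster).

-- ===== PORT A =====
-- literal port: defaultdict(list) grouping pass, then enumerate each group into form_dict
def assign_form_indexes (species_list : List String) (form_species : List (String × String)) : List (String × Int × String) :=
  let fsd := PySem.Dict.mk form_species
  let form_groups : PySem.Dict String (List String) :=
    species_list.foldl (fun d species =>
      if fsd.contains species then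
        -- form_species[species]: contains holds here, so get? is some; .getD species is the total reading
        d.modify ((fsd.get? species).getD species) [] (fun l => l ++ [species])
      else
        d.modify species [] (fun l => l ++ [species])) PySem.Dict.empty
  let form_dict : PySem.Dict (String × Int) String :=
    form_groups.items.foldl (fun fd p =>
      (PySem.List.enumerate p.2 0).foldl (fun fd q =>
        fd.insert (p.1, q.1) (PySem.Str.replace q.2 "SPECIES_" "")) fd) PySem.Dict.empty
  form_dict.items.map (fun r => (r.1.1, r.1.2, r.2))

-- ===== PORT B =====
def assign_form_indexes_alt (species_list : List String) (form_species : List (String × String)) : List (String × Int × String) :=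
  let fsd := PySem.Dict.mk form_species
  let bases := PySem.List.dedup (species_list.map (fun s => fsd.getD s s))
  let out : PySem.Dict (String × Int) String :=
    bases.foldl (fun od b =>
      (PySem.List.enumerate (species_list.filter (fun x => fsd.getD x x == b)) 0).foldl (fun od q =>
        od.insert (b, q.1) (PySem.Str.replace q.2 "SPECIES_" "")) od) PySem.Dict.empty
  out.items.map (fun r => (r.1.1, r.1.2, r.2))

-- ===== PRECONDITION & SPEC =====
def Spec_assign_form_indexes (species_list : List String) (form_species : List (String × String)) (out : List (String × Int × String)) : Prop := out = assign_form_indexes_alt species_list form_species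
instance (species_list : List String) (form_species : List (String × String)) (out : List (String × Int × String)) : Decidable (Spec_assign_form_indexes species_list form_species out) := by unfold Spec_assign_form_indexes; infer_instance

-- ===== CLAIM (what is proved, stated in full; the proofs are below) =====
def Claim_equal_assign_form_indexes : Prop := ∀ (species_list : List String) (form_species : List (String × String)), Dom_assign_form_indexes species_list form_species → Spec_assign_form_indexes species_list form_species (assign_form_indexes species_list form_species)

-- ===== LEMMAS AND PROOFS =====

theorem base_if_eq_getD (fsd : PySem.Dict String String) (s : String) :
    (if fsd.contains s then (fsd.get? s).getD s else s) = fsd.getD s s := by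
  by_cases h : fsd.contains s = true
  · simp [h, PySem.Dict.getD_eq_get?_getD]
  · simp only [Bool.not_eq_true] at h
    simp [h, PySem.Dict.getD_of_not_contains fsd s h]

theorem assign_form_indexes_main (species_list : List String) (fsd : PySem.Dict String String) :
    (let form_groups : PySem.Dict String (List String) :=
      species_list.foldl (fun d species =>
        if fsd.contains species then
          d.modify ((fsd.get? species).getD species) [] (fun l => l ++ [species])
        else
          d.modify species [] (fun l => l ++ [species])) PySem.Dict.empty
    let form_dict : PySem.Dict (String × Int) String :=
      form_groups.items.foldl (fun fd p =>
        (PySem.List.enumerate p.2 0).foldl (fun fd q =>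
          fd.insert (p.1, q.1) (PySem.Str.replace q.2 "SPECIES_" "")) fd) PySem.Dict.empty
    form_dict.items.map (fun r => (r.1.1, r.1.2, r.2)))
    =
    (let bases := PySem.List.dedup (species_list.map (fun s => fsd.getD s s))
    let out : PySem.Dict (String × Int) String :=
      bases.foldl (fun od b =>
        (PySem.List.enumerate (species_list.filter (fun x => fsd.getD x x == b)) 0).foldl (fun od q =>
          od.insert (b, q.1) (PySem.Str.replace q.2 "SPECIES_" "")) od) PySem.Dict.empty
    out.items.map (fun r => (r.1.1, r.1.2, r.2))) := by
  simp only []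
  -- phase 1: the grouping foldl is a modify-with-key loop over (base, species) pairs
  have hgrp : (species_list.foldl (fun d species =>
      if fsd.contains species then
        d.modify ((fsd.get? species).getD species) [] (fun l => l ++ [species])
      else
        d.modify species [] (fun l => l ++ [species])) PySem.Dict.empty)
      = (species_list.map (fun s => (fsd.getD s s, s))).foldl
          (fun d p => d.modify p.1 [] (fun l => l ++ [p.2])) PySem.Dict.empty := by
    rw [List.foldl_map]
    apply PySem.List.foldl_congr_mem
    intro d s _
    rw [← base_if_eq_getD fsd s]
    by_cases h : fsd.contains s = true <;> simp [h]
  rw [hgrp]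
  set pl := species_list.map (fun s => (fsd.getD s s, s)) with hpl
  set G := pl.foldl (fun d p => d.modify p.1 [] (fun l => l ++ [p.2])) PySem.Dict.empty with hG
  have hnd : G.keys.Nodup := by
    rw [hG]
    exact PySem.Dict.nodup_keys_foldl_modify_key pl (fun p => p.1) [] (fun _ p l => l ++ [p.2]) _
      PySem.Dict.nodup_keys_empty
  have hkeys : G.keys = PySem.List.dedup (species_list.map (fun s => fsd.getD s s)) := by
    rw [hG, PySem.Dict.keys_foldl_modify_key pl (fun p => p.1) [] (fun _ p l => l ++ [p.2]) PySem.Dict.empty]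
    simp [hpl, PySem.Set.update_nil_left, PySem.Dict.keys_empty, List.map_map, Function.comp_def,
      PySem.List.dedup_eq_ofList]
  have hgetD : ∀ b, G.getD b [] = species_list.filter (fun x => fsd.getD x x == b) := by
    intro b
    rw [hG, PySem.Dict.getD_foldl_modify_append]
    simp [hpl, List.filter_map, Function.comp_def]
  have hitems : G.items = (PySem.List.dedup (species_list.map (fun s => fsd.getD s s))).map
      (fun b => (b, species_list.filter (fun x => fsd.getD x x == b))) := by
    rw [PySem.Dict.items_eq_map_keys G hnd [], hkeys]
    apply List.map_congr_left
    intro b _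
    rw [hgetD b]
  rw [hitems, List.foldl_map]

theorem assign_form_indexes_spec_aux (species_list : List String) (form_species : List (String × String)) :
    assign_form_indexes species_list form_species = assign_form_indexes_alt species_list form_species := by
  unfold assign_form_indexes assign_form_indexes_alt
  exact assign_form_indexes_main species_list (PySem.Dict.mk form_species)

-- ===== VERDICT (by name: the statement is the Claim_ definition above) =====
theorem assign_form_indexes_spec : Claim_equal_assign_form_indexes := by
  intro species_list form_species _
  unfold Spec_assign_form_indexes
  exact assign_form_indexes_spec_aux species_list form_species
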